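-- pv_equiv track=rewrite | github.com/SeldaEmir/Machine-Learning- | Path Finding/PathFinding.py | feature2
-- ===== SOURCE A (Python) =====
-- def feature2(x):
--     """This feature computes the sum of the max of continuous black squares
--        in each row
--        Parameters
--        ----------
--        x: 2-dimensional array representing a maze
--        Returns
--        -------
--        feature2_value: type-float
--        """
--
--     sayac = 0
--     maks = 0
--     feature2_value = 0
--     for b in x:
--         sayac = 0
--         maks = 0
--         for i in b:
--             if i == 0:
--                 sayac = 0
--             else:
--                 sayac += 1
--                 if sayac > maks:
--                     maks = sayac
--
--         feature2_value = feature2_value + maks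
--
--     return feature2_value
-- ===== SOURCE B (Python) =====
-- def feature2(x):
--     """Sum over rows of the longest run of nonzero cells.
--
--     Run-skipping scan: find each maximal nonzero run at once and jump over it,
--     instead of A's cell-by-cell counter/max bookkeeping."""
--     total = 0
--     for row in x:
--         best = 0
--         j = 0
--         n = len(row)
--         while j < n:
--             if row[j] == 0:
--                 j += 1
--             else:
--                 k = j
--                 while k < n and row[k] != 0:
--                     k += 1
--                 if k - j > best:
--                     best = k - j
--                 j = k
--         total += best
--     return total
-- ===== Notes on version B (the rewrite author's own statement) =====
-- stated objective: alternative
-- what changed: B replaces A's per-cell running counter and max with a run-skipping scan: at each nonzero cell it measures the whole maximal nonzero run at once, takes its length into the row maximum, and jumps past the run.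
import Mathlib
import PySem

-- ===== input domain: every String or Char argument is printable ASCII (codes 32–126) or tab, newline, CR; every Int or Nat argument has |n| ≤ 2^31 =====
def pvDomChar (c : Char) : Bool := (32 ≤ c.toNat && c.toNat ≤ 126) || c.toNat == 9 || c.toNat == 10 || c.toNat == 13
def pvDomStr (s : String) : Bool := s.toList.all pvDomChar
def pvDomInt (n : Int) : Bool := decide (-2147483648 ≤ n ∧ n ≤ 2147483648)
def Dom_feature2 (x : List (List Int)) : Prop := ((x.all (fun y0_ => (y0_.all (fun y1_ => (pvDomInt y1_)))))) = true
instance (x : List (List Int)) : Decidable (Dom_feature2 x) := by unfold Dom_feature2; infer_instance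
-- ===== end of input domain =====

-- B: run-skipping scan (measure each maximal nonzero run at once and jump past it) instead of A's per-cell counter/max; alternative decomposition, same cost.

-- ===== PORT A =====
-- state = (sayac, maks, feature2_value), exactly A's three variables
def feature2 (x : List (List Int)) : Int :=
  (x.foldl (fun (st : Int × Int × Int) b =>
    let st2 := b.foldl (fun (q : Int × Int × Int) i =>
      if i = 0 then (0, q.2.1, q.2.2)
      else
        let s := q.1 + 1
        (s, if s > q.2.1 then s else q.2.1, q.2.2)) (0, 0, st.2.2)
    (st2.1, st2.2.1, st2.2.2 + st2.2.1)) (0, 0, 0)).2.2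

-- ===== PORT B =====
-- B's while-loops over indices j/k, as structural recursion on the remaining suffix row[j:]:
-- 'row[j] == 0: j += 1' drops the head; the inner run-measuring while (k - j) is takeWhile's
-- length and 'j = k' is dropWhile; 'if k - j > best' is the max.
def rowBest : List Int → Int
  | [] => 0
  | i :: t =>
    if i = 0 then rowBest t
    else
      max (((((i :: t).takeWhile (fun v => v ≠ 0)).length : Int)))
        (rowBest ((i :: t).dropWhile (fun v => v ≠ 0)))
termination_by l => l.length
decreasing_by
  · simp
  · simp only [List.dropWhile_cons]
    split
    · exact Nat.lt_succ_of_le (List.length_dropWhile_le _ t)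
    · simp_all

def feature2_alt (x : List (List Int)) : Int :=
  x.foldl (fun total row => total + rowBest row) 0

-- ===== PRECONDITION & SPEC =====
def Spec_feature2 (x : List (List Int)) (out : Int) : Prop := out = feature2_alt x
instance (x : List (List Int)) (out : Int) : Decidable (Spec_feature2 x out) := by unfold Spec_feature2; infer_instance

-- ===== CLAIM (what is proved, stated in full; the proofs are below) =====
def Claim_equal_feature2 : Prop := ∀ (x : List (List Int)), Dom_feature2 x → Spec_feature2 x (feature2 x)

-- ===== LEMMAS AND PROOFS =====

-- A's inner- and outer-loop bodies, named so the invariants can be stated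
def innerStep (q : Int × Int × Int) (i : Int) : Int × Int × Int :=
  if i = 0 then (0, q.2.1, q.2.2)
  else
    let s := q.1 + 1
    (s, if s > q.2.1 then s else q.2.1, q.2.2)

def outerStep (st : Int × Int × Int) (b : List Int) : Int × Int × Int :=
  let st2 := b.foldl innerStep (0, 0, st.2.2)
  (st2.1, st2.2.1, st2.2.2 + st2.2.1)

-- max run length seen from a point where the current run already has length s
def mrf : List Int → Int → Int
  | [], s => s
  | i :: t, s => if i = 0 then max s (mrf t 0) else mrf t (s + 1)

lemma rowBest_nil : rowBest [] = 0 := by rw [rowBest]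

lemma rowBest_cons_zero (t : List Int) : rowBest (0 :: t) = rowBest t := by
  rw [rowBest]; simp

lemma rowBest_cons_ne (i : Int) (t : List Int) (h : i ≠ 0) :
    rowBest (i :: t) =
      max (((((i :: t).takeWhile (fun v => v ≠ 0)).length : Int)))
        (rowBest ((i :: t).dropWhile (fun v => v ≠ 0))) := by
  rw [rowBest]; simp [h]

lemma le_mrf (t : List Int) (s : Int) : s ≤ mrf t s := by
  induction t generalizing s with
  | nil => simp [mrf]
  | cons i t ih =>
    simp only [mrf]
    split
    · exact le_max_left _ _
    · exact le_trans (by omega) (ih (s + 1))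

lemma inner_third (b : List Int) (q : Int × Int × Int) :
    (b.foldl innerStep q).2.2 = q.2.2 := by
  induction b generalizing q with
  | nil => rfl
  | cons i t ih =>
    simp only [List.foldl_cons, ih]
    simp only [innerStep]; split <;> rfl

lemma inner_maks (b : List Int) (s m c : Int) (hs : 0 ≤ s) (hsm : s ≤ m) :
    (b.foldl innerStep (s, m, c)).2.1 = max m (mrf b s) := by
  induction b generalizing s m with
  | nil => simp only [List.foldl_nil, mrf]; exact (max_eq_left hsm).symm
  | cons i t ih =>
    simp only [List.foldl_cons, innerStep, mrf]
    by_cases hi : i = 0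
    · simp only [if_pos hi]
      rw [ih 0 m (le_refl 0) (le_trans hs hsm)]
      have := le_mrf t (0 : Int)
      rcases max_cases m (mrf t 0) with ⟨h1, h2⟩ | ⟨h1, h2⟩ <;>
        rcases max_cases s (mrf t 0) with ⟨h3, h4⟩ | ⟨h3, h4⟩ <;>
        rcases max_cases m (max s (mrf t 0)) with ⟨h5, h6⟩ | ⟨h5, h6⟩ <;> omega
    · simp only [if_neg hi]
      have hmax : (if s + 1 > m then s + 1 else m) = max m (s + 1) := by
        rcases max_cases m (s + 1) with ⟨h1, h2⟩ | ⟨h1, h2⟩ <;> rw [h1] <;> split <;> omega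
      rw [hmax, ih (s + 1) (max m (s + 1)) (by omega) (le_max_right _ _)]
      have := le_mrf t (s + 1)
      rcases max_cases m (mrf t (s + 1)) with ⟨h1, h2⟩ | ⟨h1, h2⟩ <;>
        rcases max_cases (max m (s + 1)) (mrf t (s + 1)) with ⟨h3, h4⟩ | ⟨h3, h4⟩ <;>
        rcases max_cases m (s + 1) with ⟨h5, h6⟩ | ⟨h5, h6⟩ <;> omega

lemma mrf_shift (t : List Int) (s : Int) (hs : 0 ≤ s) :
    mrf t s = max (s + ((t.takeWhile (fun v => v ≠ 0)).length : Int))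
      (mrf (t.dropWhile (fun v => v ≠ 0)) 0) := by
  induction t generalizing s with
  | nil =>
    simp only [List.takeWhile_nil, List.dropWhile_nil, List.length_nil, Nat.cast_zero, add_zero,
      mrf]
    exact (max_eq_left hs).symm
  | cons i t ih =>
    by_cases hi : i = 0
    · subst hi
      have h2 : ((0 : Int) :: t).takeWhile (fun v => v ≠ 0) = [] := by
        simp
      have h3 : ((0 : Int) :: t).dropWhile (fun v => v ≠ 0) = (0 :: t) := by
        simp
      rw [h2, h3]
      have h1 : mrf ((0 : Int) :: t) s = max s (mrf t 0) := by simp [mrf]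
      have h4 : mrf ((0 : Int) :: t) 0 = max 0 (mrf t 0) := by simp [mrf]
      rw [h1, h4, max_eq_right (le_mrf t 0)]
      norm_num
    · have htw : (i :: t).takeWhile (fun v => v ≠ 0) = i :: t.takeWhile (fun v => v ≠ 0) := by
        simp [hi]
      have hdw : (i :: t).dropWhile (fun v => v ≠ 0) = t.dropWhile (fun v => v ≠ 0) := by
        simp [hi]
      rw [htw, hdw]
      simp only [mrf, if_neg hi]
      rw [ih (s + 1) (by omega)]
      congr 1
      simp only [List.length_cons]
      push_cast
      ring

lemma mrf_eq_rowBest (t : List Int) : mrf t 0 = rowBest t := by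
  induction hn : t.length using Nat.strong_induction_on generalizing t with
  | _ n ih =>
    cases t with
    | nil => simp [mrf, rowBest_nil]
    | cons i r =>
      by_cases hi : i = 0
      · subst hi
        rw [rowBest_cons_zero]
        have h1 : mrf ((0 : Int) :: r) 0 = max 0 (mrf r 0) := by simp [mrf]
        rw [h1, max_eq_right (le_mrf r 0)]
        exact ih r.length (by simp [← hn]) r rfl
      · rw [rowBest_cons_ne i r hi]
        have htw : (i :: r).takeWhile (fun v => v ≠ 0) = i :: r.takeWhile (fun v => v ≠ 0) := by
          simp [hi]
        have hdw : (i :: r).dropWhile (fun v => v ≠ 0) = r.dropWhile (fun v => v ≠ 0) := by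
          simp [hi]
        have h1 : mrf (i :: r) 0 = mrf r 1 := by simp [mrf, hi]
        rw [h1, mrf_shift r 1 (by omega), htw, hdw]
        have hlen : (r.dropWhile (fun v => (decide (v ≠ 0)))).length < n := by
          have := List.length_dropWhile_le (fun v => decide (v ≠ 0)) r
          simp only [← hn, List.length_cons]; omega
        rw [ih _ hlen _ rfl]
        congr 1
        simp only [List.length_cons]
        push_cast
        ring

lemma outer_acc (x : List (List Int)) (q : Int × Int × Int) :
    (x.foldl outerStep q).2.2 = x.foldl (fun total row => total + rowBest row) q.2.2 := by
  induction x generalizing q with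
  | nil => rfl
  | cons b t ih =>
    simp only [List.foldl_cons]
    rw [ih]
    congr 1
    show (outerStep q b).2.2 = q.2.2 + rowBest b
    unfold outerStep
    simp only
    rw [inner_third b (0, 0, q.2.2), inner_maks b 0 0 q.2.2 (le_refl 0) (le_refl 0),
        mrf_eq_rowBest, max_eq_right]
    rw [← mrf_eq_rowBest]
    exact le_mrf b 0

-- ===== VERDICT (by name: the statement is the Claim_ definition above) =====
theorem feature2_spec : Claim_equal_feature2 := by
  intro x _
  unfold Spec_feature2 feature2 feature2_alt
  exact outer_acc x (0, 0, 0)
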